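-- pv_equiv track=rewrite | github.com/olliemath/AdventOfCode | 2021/python/day_17/solution.py | find_y_inter
-- ===== SOURCE A (Python) =====
-- def find_y_inter(box):
--     # If you shoot up at vy, it takes 2*vy+1 to get back down to 0
--     # at which point you have velocity -vy-1
--     # We know we'll overshoot the box if -vy-1 < ymin, i.e. if
--     # vy > -ymin-1
--
--     result = {}
--     for vy0 in range(-box[2]):
--         intersections = []
--         vy = -vy0 - 1
--         y = 0
--         t = 2 * vy0 + 1
--         while y >= box[2]:
--             y += vy
--             t += 1
--             vy -= 1
--             if box[2] <= y <= box[3]: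
--                 intersections.append(t)
--
--         if intersections:
--             result[vy0] = (min(intersections), max(intersections))
--
--     # We also do the negative y things
--     for vy0 in range(box[2], 0):
--         intersections = []
--         vy = vy0
--         y = 0
--         t = 0
--         while y >= box[2]:
--             y += vy
--             t += 1
--             vy -= 1
--             if box[2] <= y <= box[3]:
--                 intersections.append(t)
--
--         if intersections:
--             result[vy0] = (min(intersections), max(intersections))
--
--     return result
-- ===== SOURCE B (Python) =====
-- def find_y_inter(box):
--     ymin = box[2]
--     result = {}
--     for v0 in [*range(-ymin), *range(ymin, 0)]:
--         # A shot fired up at v0 >= 0 re-passes y = 0 at time 2*v0 + 1 with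
--         # velocity -v0 - 1, so every trajectory is a downward shot v <= -1
--         # started at time t0.
--         v = v0 if v0 < 0 else -v0 - 1
--         t0 = 0 if v0 < 0 else 2 * v0 + 1
--         # Closed form: k steps after t0 the height is k*v - k*(k-1)//2, i.e.
--         # k*(2*v - k + 1)/2.  It is strictly decreasing and at most k*v, so a
--         # hit needs k <= -ymin // -v; the hits are consecutive: take the ends.
--         lo, hi = 2 * ymin, 2 * box[3]
--         ts = [t0 + k for k in range(1, -ymin // -v + 1)
--               if lo <= k * (2 * v - k + 1) <= hi]
--         if ts:
--             result[v0] = (ts[0], ts[-1])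
--     return result
-- ===== Notes on version B (the rewrite author's own statement) =====
-- stated objective: alternative
-- what changed: B replaces A's two copies of a stateful step-by-step trajectory simulation (mutable y/vy/t while-loop collecting a hit list, then min/max) by one loop over all candidate velocities that reduces each shot to a downward shot via the symmetry t0=2*v0+1 and filters the closed-form height condition 2*ymin <= k*(2*v-k+1) <= 2*ymax over k in range(1, -ymin//-v + 1), reading the first/last hit directly.
import Mathlib
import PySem

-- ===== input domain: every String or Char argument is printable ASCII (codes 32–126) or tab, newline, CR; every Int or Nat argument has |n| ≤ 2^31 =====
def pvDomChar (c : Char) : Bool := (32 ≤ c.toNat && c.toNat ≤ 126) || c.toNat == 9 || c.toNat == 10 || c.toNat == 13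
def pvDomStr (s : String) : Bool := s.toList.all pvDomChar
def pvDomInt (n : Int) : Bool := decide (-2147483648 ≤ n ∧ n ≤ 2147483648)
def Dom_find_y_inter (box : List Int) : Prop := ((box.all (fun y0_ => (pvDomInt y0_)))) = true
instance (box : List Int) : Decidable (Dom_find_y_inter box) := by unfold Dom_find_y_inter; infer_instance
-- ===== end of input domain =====

-- B replaces A's two copies of a stateful trajectory simulation by one loop over all
-- candidate velocities that filters the closed-form height k*v - k*(k-1)//2 over the
-- bounded range k ≤ -ymin//-v and reads the first/last hit directly (objective:
-- alternative; same asymptotic cost, no speed claimed).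


-- ===== PORT A =====
-- A's while loop "while y >= ymin: y += vy; t += 1; vy -= 1; if ymin <= y <= ymax: append t".
-- At both call sites vy < 0, so vy is represented as -1 - m with m : Nat (the same state,
-- made so that the recursion visibly terminates: y strictly decreases).
def pvSimLoop (ymin ymax y t : Int) (m : Nat) (acc : List Int) : List Int :=
  if ymin ≤ y then
    pvSimLoop ymin ymax (y + (-1 - (m : Int))) (t + 1) (m + 1)
      (if ymin ≤ y + (-1 - (m : Int)) ∧ y + (-1 - (m : Int)) ≤ ymax then acc ++ [t + 1] else acc)
  else acc
termination_by (y + 1 - ymin).toNat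
decreasing_by omega

def find_y_inter (box : List Int) : List (Int × List Int) :=
  let ymin := PySem.List.pyGetD box 2 0  -- box[2]; in range whenever Python reads it, by Pre_
  let ymax := PySem.List.pyGetD box 3 0  -- box[3]; only reached when a loop body runs (Pre_)
  let d1 := (PySem.List.pyRange 0 (-ymin) 1).foldl (fun d vy0 =>
      -- vy = -vy0 - 1 = -1 - m with m = vy0 (here vy0 ≥ 0); y = 0; t = 2*vy0 + 1
      let ints := pvSimLoop ymin ymax 0 (2 * vy0 + 1) vy0.toNat []
      if ints.isEmpty then d
      else d.insert vy0 [(PySem.List.min? ints (fun z => z)).getD 0,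
                         (PySem.List.max? ints (fun z => z)).getD 0])
    PySem.Dict.empty
  let d2 := (PySem.List.pyRange ymin 0 1).foldl (fun d vy0 =>
      -- vy = vy0 = -1 - m with m = -vy0 - 1 (here vy0 < 0); y = 0; t = 0
      let ints := pvSimLoop ymin ymax 0 0 (-vy0 - 1).toNat []
      if ints.isEmpty then d
      else d.insert vy0 [(PySem.List.min? ints (fun z => z)).getD 0,
                         (PySem.List.max? ints (fun z => z)).getD 0])
    d1
  d2.items

-- ===== PORT B =====
def find_y_inter_alt (box : List Int) : List (Int × List Int) :=
  let ymin := PySem.List.pyGetD box 2 0  -- box[2]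
  let vels := PySem.List.pyRange 0 (-ymin) 1 ++ PySem.List.pyRange ymin 0 1
  (vels.foldl (fun d v0 =>
      let v := if v0 < 0 then v0 else -v0 - 1
      let t0 := if v0 < 0 then 0 else 2 * v0 + 1
      let lo := 2 * ymin
      let hi := 2 * PySem.List.pyGetD box 3 0
      let ts := ((PySem.List.pyRange 1 (PySem.Int.floordiv (-ymin) (-v) + 1) 1).filter (fun k =>
          decide (lo ≤ k * (2 * v - k + 1)) && decide (k * (2 * v - k + 1) ≤ hi))).map
        (fun k => t0 + k)
      if ts.isEmpty then d
      else d.insert v0 [PySem.List.pyGetD ts 0 0, PySem.List.pyGetD ts (-1) 0])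
    PySem.Dict.empty).items

-- ===== PRECONDITION & SPEC =====
-- Pre_ excludes exactly the inputs where Python A raises IndexError: boxes shorter than 3,
-- and length-3 boxes with box[2] < 0 (there the loop body reads the missing box[3]).
def Pre_find_y_inter (box : List Int) : Prop :=
  4 ≤ box.length ∨ (box.length = 3 ∧ 0 ≤ PySem.List.pyGetD box 2 0)
instance (box : List Int) : Decidable (Pre_find_y_inter box) := by unfold Pre_find_y_inter; infer_instance
def pvWitness_find_y_inter : List Int := [20, 30, -10, -5]

def Spec_find_y_inter (box : List Int) (out : List (Int × List Int)) : Prop := out = find_y_inter_alt box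
instance (box : List Int) (out : List (Int × List Int)) : Decidable (Spec_find_y_inter box out) := by unfold Spec_find_y_inter; infer_instance

-- ===== CLAIM (what is proved, stated in full; the proofs are below) =====
def Claim_equal_find_y_inter : Prop := ∀ (box : List Int), Dom_find_y_inter box → Pre_find_y_inter box → Spec_find_y_inter box (find_y_inter box)

-- ===== LEMMAS AND PROOFS =====

-- the closed-form height k steps after t0 for a downward shot v (Source B's filter compares
-- its double, k*(2*v - k + 1), against 2*ymin and 2*ymax)
def pvY (v k : Int) : Int := k * v - PySem.Int.floordiv (k * (k - 1)) 2

lemma pvY_zero (v : Int) : pvY v 0 = 0 := by simp [pvY]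

lemma pv_fd_two (n : Int) : PySem.Int.floordiv (2 * n) 2 = n := by
  rw [PySem.Int.floordiv_eq_iff_of_pos (by omega)]; omega

lemma pvY_succ (v k : Int) : pvY v (k + 1) = pvY v k + (v - k) := by
  obtain ⟨n, hn⟩ : Even ((k - 1) * (k - 1 + 1)) := Int.even_mul_succ_self (k - 1)
  have h1 : k * (k - 1) = 2 * n := by ring_nf; ring_nf at hn; omega
  have h2 : (k + 1) * ((k + 1) - 1) = 2 * (n + k) := by ring_nf; ring_nf at hn; omega
  simp only [pvY, h1, h2, pv_fd_two]
  ring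

lemma pv_fd_nonneg (k : Int) (hk : 1 ≤ k) : (0 : Int) ≤ PySem.Int.floordiv (k * (k - 1)) 2 := by
  rw [PySem.Int.le_floordiv_iff_mul_le (by omega)]
  nlinarith

lemma pvY_le_neg (v k : Int) (hv : v ≤ -1) (hk : 1 ≤ k) : pvY v k ≤ -k := by
  have h0 := pv_fd_nonneg k hk
  have : k * v ≤ -k := by nlinarith
  simp only [pvY]; omega

lemma pvY_anti_nat (v a : Int) (hv : v ≤ -1) (ha : 0 ≤ a) :
    ∀ n : Nat, pvY v (a + n) ≤ pvY v a := by
  intro n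
  induction n with
  | zero => simp
  | succ n ih =>
      have h := pvY_succ v (a + n)
      push_cast
      have heq : a + ((n : Int) + 1) = (a + n) + 1 := by ring
      rw [heq, h]
      have : v - (a + (n : Int)) ≤ 0 := by omega
      omega

lemma pvY_anti (v a b : Int) (hv : v ≤ -1) (ha : 0 ≤ a) (hab : a ≤ b) : pvY v b ≤ pvY v a := by
  have h := pvY_anti_nat v a hv ha (b - a).toNat
  have hb : a + ((b - a).toNat : Int) = b := by omega
  rwa [hb] at h

lemma pv_loop_char (ymin ymax t0 : Int) (m0 : Nat) :
    ∀ (n : Nat) (j : Nat) (acc : List Int), ((-ymin + 1 - (j : Int)).toNat ≤ n) →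
    pvSimLoop ymin ymax (pvY (-1 - (m0 : Int)) j) (t0 + j) (m0 + j) acc
      = acc ++ ((PySem.List.pyRange ((j : Int) + 1) (-ymin + 1) 1).filter (fun k =>
          decide (ymin ≤ pvY (-1 - (m0 : Int)) k) && decide (pvY (-1 - (m0 : Int)) k ≤ ymax))).map
          (fun k => t0 + k) := by
  have hv : (-1 - (m0 : Int)) ≤ -1 := by omega
  intro n
  induction n with
  | zero =>
      intro j acc h
      rw [pvSimLoop]
      by_cases h1 : ymin ≤ pvY (-1 - (m0 : Int)) j
      · exfalso
        rcases Nat.eq_zero_or_pos j with hj0 | hj1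
        · subst hj0; simp only [Nat.cast_zero, pvY_zero] at h1; simp at h; omega
        · have := pvY_le_neg (-1 - (m0 : Int)) j hv (by exact_mod_cast hj1)
          omega
      · rw [if_neg h1]
        have hnil : PySem.List.pyRange ((j : Int) + 1) (-ymin + 1) 1 = [] :=
          PySem.List.pyRange_one_eq_nil (by omega)
        simp [hnil]
  | succ n ih =>
      intro j acc h
      rw [pvSimLoop]
      by_cases h1 : ymin ≤ pvY (-1 - (m0 : Int)) j
      · rw [if_pos h1]
        have hjb : (j : Int) ≤ -ymin := by
          rcases Nat.eq_zero_or_pos j with hj0 | hj1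
          · subst hj0; simp only [Nat.cast_zero, pvY_zero] at h1 ⊢; omega
          · have := pvY_le_neg (-1 - (m0 : Int)) j hv (by exact_mod_cast hj1)
            omega
        have hy : pvY (-1 - (m0 : Int)) (j : Int) + (-1 - ((m0 + j : Nat) : Int))
            = pvY (-1 - (m0 : Int)) ((j : Int) + 1) := by
          rw [pvY_succ]; push_cast; ring
        rw [hy]
        have hnext := ih (j + 1)
            (if ymin ≤ pvY (-1 - (m0 : Int)) ((j : Int) + 1) ∧
                pvY (-1 - (m0 : Int)) ((j : Int) + 1) ≤ ymax then acc ++ [t0 + (j : Int) + 1]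
             else acc)
            (by omega)
        push_cast at hnext
        have ht : t0 + (j : Int) + 1 = t0 + ((j : Int) + 1) := by ring
        rw [ht] at hnext ⊢
        simp only [Nat.add_assoc]
        rw [hnext]
        have hyj1 := pvY_le_neg (-1 - (m0 : Int)) ((j : Int) + 1) hv (by omega)
        by_cases hj2 : (j : Int) + 1 < -ymin + 1
        · rw [PySem.List.pyRange_one_cons hj2, List.filter_cons]
          by_cases hP : ymin ≤ pvY (-1 - (m0 : Int)) ((j : Int) + 1) ∧
              pvY (-1 - (m0 : Int)) ((j : Int) + 1) ≤ ymax
          · simp only [hP.1, hP.2, decide_true, Bool.and_self, if_true, List.map_cons]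
            simp [List.append_assoc]
          · rw [if_neg hP]
            have hb : (decide (ymin ≤ pvY (-1 - (m0 : Int)) ((j : Int) + 1)) &&
                decide (pvY (-1 - (m0 : Int)) ((j : Int) + 1) ≤ ymax)) = false := by
              rcases not_and_or.mp hP with hc | hc <;> simp [hc]
            rw [hb]
            simp
        · have hj3 : (j : Int) = -ymin := by omega
          have hPfalse : ¬ (ymin ≤ pvY (-1 - (m0 : Int)) ((j : Int) + 1) ∧
              pvY (-1 - (m0 : Int)) ((j : Int) + 1) ≤ ymax) := by
            intro hP; omega
          rw [if_neg hPfalse]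
          have hnil1 : PySem.List.pyRange ((j : Int) + 1) (-ymin + 1) 1 = [] :=
            PySem.List.pyRange_one_eq_nil (by omega)
          have hnil2 : PySem.List.pyRange ((j : Int) + 1 + 1) (-ymin + 1) 1 = [] :=
            PySem.List.pyRange_one_eq_nil (by omega)
          simp [hnil1, hnil2]
      · rw [if_neg h1]
        have hnil : ((PySem.List.pyRange ((j : Int) + 1) (-ymin + 1) 1).filter (fun k =>
            decide (ymin ≤ pvY (-1 - (m0 : Int)) k) &&
            decide (pvY (-1 - (m0 : Int)) k ≤ ymax))) = [] := by
          rw [List.filter_eq_nil_iff]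
          intro k hk
          obtain ⟨hk1, hk2⟩ := (PySem.List.mem_pyRange_one).mp hk
          have : pvY (-1 - (m0 : Int)) k ≤ pvY (-1 - (m0 : Int)) j :=
            pvY_anti _ _ _ hv (by omega) (by omega)
          have : ¬ (ymin ≤ pvY (-1 - (m0 : Int)) k) := by omega
          simp [this]
        simp [hnil]

lemma pv_sim_eq (ymin ymax t0 : Int) (m0 : Nat) :
    pvSimLoop ymin ymax 0 t0 m0 []
      = ((PySem.List.pyRange 1 (-ymin + 1) 1).filter (fun k =>
          decide (ymin ≤ pvY (-1 - (m0 : Int)) k) && decide (pvY (-1 - (m0 : Int)) k ≤ ymax))).map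
          (fun k => t0 + k) := by
  have h := pv_loop_char ymin ymax t0 m0 ((-ymin + 1).toNat) 0 [] (by omega)
  simpa [pvY_zero] using h

lemma pv_le_getLast : ∀ (l : List Int) (h : l ≠ []), l.Pairwise (· < ·) →
    ∀ x ∈ l, x ≤ l.getLast h := by
  intro l
  induction l with
  | nil => intro h; simp at h
  | cons a t ih =>
      intro h hs x hx
      cases t with
      | nil => simp at hx; simp [hx]
      | cons b t' =>
          rw [List.getLast_cons (by simp)]
          rcases List.mem_cons.mp hx with rfl | hxt
          · have hmem := List.getLast_mem (l := b :: t') (by simp)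
            have := (List.pairwise_cons.mp hs).1 _ hmem
            omega
          · exact ih (by simp) (List.pairwise_cons.mp hs).2 x hxt

lemma pv_min_getD (l : List Int) (h : l ≠ []) (hs : l.Pairwise (· < ·)) :
    (PySem.List.min? l (fun z => z)).getD 0 = PySem.List.pyGetD l 0 0 := by
  cases l with
  | nil => simp at h
  | cons x t =>
      rw [PySem.List.min?_id_cons, PySem.List.pyGetD_zero_cons]
      rcases PySem.List.foldl_min_mem t x with h2 | h2
      · simp [h2]
      · have h3 := (PySem.List.foldl_min_le t x).1
        have := (List.pairwise_cons.mp hs).1 _ h2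
        simp only [Option.getD_some]
        omega

lemma pv_max_getD (l : List Int) (h : l ≠ []) (hs : l.Pairwise (· < ·)) :
    (PySem.List.max? l (fun z => z)).getD 0 = PySem.List.pyGetD l (-1) 0 := by
  cases l with
  | nil => simp at h
  | cons x t =>
      rw [PySem.List.max?_id_cons, PySem.List.pyGetD_neg_one _ _ h]
      have hfold := PySem.List.le_foldl_max t x
      have hmem : t.foldl max x ∈ x :: t := by
        rcases PySem.List.foldl_max_mem t x with h2 | h2
        · simp [h2]
        · simp [h2]
      have hle1 : t.foldl max x ≤ (x :: t).getLast h := pv_le_getLast _ h hs _ hmem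
      have hle2 : (x :: t).getLast h ≤ t.foldl max x := by
        rcases List.mem_cons.mp (List.getLast_mem h) with he | he
        · rw [he]; exact hfold.1
        · exact hfold.2 _ he
      simp only [Option.getD_some]
      omega

lemma pv_ts_pairwise (t0 M : Int) (p : Int → Bool) :
    (((PySem.List.pyRange 1 M 1).filter p).map (fun k => t0 + k)).Pairwise (· < ·) := by
  rw [List.pairwise_map]
  exact ((PySem.List.pairwise_lt_pyRange_one 1 M).filter p).imp (fun hab => by omega)

-- fold congruence that also lets the initial accumulators differ (glue for the assembly)
lemma pv_foldl_congr2 {α β : Type} (l : List α) (f g : β → α → β) (i1 i2 : β)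
    (h0 : i1 = i2) (h : ∀ (acc : β), ∀ x ∈ l, f acc x = g acc x) :
    List.foldl f i1 l = List.foldl g i2 l := by
  subst h0; exact PySem.List.foldl_congr_mem l f g i1 h

-- the common tail of both per-velocity bodies, once the hit lists are known equal
lemma pv_branch (t0 M : Int) (p : Int → Bool) (d : PySem.Dict Int (List Int)) (v0 : Int) :
    (if (((PySem.List.pyRange 1 M 1).filter p).map (fun k => t0 + k)).isEmpty then d
     else d.insert v0
       [(PySem.List.min? (((PySem.List.pyRange 1 M 1).filter p).map (fun k => t0 + k)) (fun z => z)).getD 0,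
        (PySem.List.max? (((PySem.List.pyRange 1 M 1).filter p).map (fun k => t0 + k)) (fun z => z)).getD 0])
    = (if (((PySem.List.pyRange 1 M 1).filter p).map (fun k => t0 + k)).isEmpty then d
       else d.insert v0
         [PySem.List.pyGetD (((PySem.List.pyRange 1 M 1).filter p).map (fun k => t0 + k)) 0 0,
          PySem.List.pyGetD (((PySem.List.pyRange 1 M 1).filter p).map (fun k => t0 + k)) (-1) 0]) := by
  by_cases hts : (((PySem.List.pyRange 1 M 1).filter p).map (fun k => t0 + k)).isEmpty
  · simp [hts]
  · have hne : (((PySem.List.pyRange 1 M 1).filter p).map (fun k => t0 + k)) ≠ [] := by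
      simpa [List.isEmpty_iff] using hts
    have hp := pv_ts_pairwise t0 M p
    rw [if_neg hts, if_neg hts, pv_min_getD _ hne hp, pv_max_getD _ hne hp]

lemma pv_two_pvY (v k : Int) : k * (2 * v - k + 1) = 2 * pvY v k := by
  obtain ⟨n, hn⟩ : Even ((k - 1) * (k - 1 + 1)) := Int.even_mul_succ_self (k - 1)
  have h1 : k * (k - 1) = 2 * n := by ring_nf; ring_nf at hn; omega
  simp only [pvY, h1, pv_fd_two]
  linear_combination -h1

-- Source B's doubled integer comparison is the same test as ymin ≤ pvY v k ≤ ymax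
lemma pv_pred_eq (ymin ymax v k : Int) :
    (decide (2 * ymin ≤ k * (2 * v - k + 1)) && decide (k * (2 * v - k + 1) ≤ 2 * ymax))
    = (decide (ymin ≤ pvY v k) && decide (pvY v k ≤ ymax)) := by
  simp only [pv_two_pvY]
  congr 1 <;> exact decide_eq_decide.mpr (by omega)

-- B scans k only up to -ymin // -v: past it the height k*v - k*(k-1)//2 is already
-- below ymin, so the filtered hit list is the same as over the full range [1, -ymin].
lemma pv_filter_cut (ymin ymax v : Int) (hv : v ≤ -1) :
    ((PySem.List.pyRange 1 (PySem.Int.floordiv (-ymin) (-v) + 1) 1).filter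
      (fun k => decide (ymin ≤ pvY v k) && decide (pvY v k ≤ ymax)))
    = ((PySem.List.pyRange 1 (-ymin + 1) 1).filter
      (fun k => decide (ymin ≤ pvY v k) && decide (pvY v k ≤ ymax))) := by
  have hlt : ∀ q : Int, PySem.Int.floordiv (-ymin) (-v) < q ↔ -ymin < q * (-v) :=
    fun q => PySem.Int.floordiv_lt_iff_lt_mul (by omega)
  by_cases hy : ymin ≤ 0
  · have hB0 : 0 ≤ PySem.Int.floordiv (-ymin) (-v) := by
      rw [PySem.Int.le_floordiv_iff_mul_le (by omega)]
      nlinarith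
    have h1 : PySem.Int.floordiv (-ymin) (-v) * (-v) ≤ -ymin :=
      (PySem.Int.le_floordiv_iff_mul_le (by omega)).mp (le_refl _)
    have hBle : PySem.Int.floordiv (-ymin) (-v) ≤ -ymin := by nlinarith
    rw [PySem.List.pyRange_one_append 1 (PySem.Int.floordiv (-ymin) (-v) + 1) (-ymin + 1)
      (by omega) (by omega), List.filter_append]
    have hnil : ((PySem.List.pyRange (PySem.Int.floordiv (-ymin) (-v) + 1) (-ymin + 1) 1).filter
        (fun k => decide (ymin ≤ pvY v k) && decide (pvY v k ≤ ymax))) = [] := by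
      rw [List.filter_eq_nil_iff]
      intro k hk
      obtain ⟨hk1, hk2⟩ := PySem.List.mem_pyRange_one.mp hk
      have hgt : -ymin < k * (-v) := (hlt k).mp (by omega)
      have h1k : (1 : Int) ≤ k := by omega
      have hfd := pv_fd_nonneg k h1k
      have hno : ¬ (ymin ≤ pvY v k) := by simp only [pvY]; nlinarith
      simp [hno]
    rw [hnil]
    simp
  · have h1 : PySem.List.pyRange 1 (-ymin + 1) 1 = [] :=
      PySem.List.pyRange_one_eq_nil (by omega)
    have h2 : PySem.List.pyRange 1 (PySem.Int.floordiv (-ymin) (-v) + 1) 1 = [] :=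
      PySem.List.pyRange_one_eq_nil (by
        have := (hlt 1).mpr (by nlinarith)
        omega)
    rw [h1, h2]

-- ===== VERDICT (by name: the statement is the Claim_ definition above) =====
theorem find_y_inter_spec : Claim_equal_find_y_inter := by
  intro box _ _
  unfold Spec_find_y_inter find_y_inter find_y_inter_alt
  simp only [List.foldl_append]
  congr 1
  apply pv_foldl_congr2
  · apply PySem.List.foldl_congr_mem
    intro acc x hx
    obtain ⟨hx0, hx1⟩ := PySem.List.mem_pyRange_one.mp hx
    rw [pv_sim_eq]
    simp only [if_neg (show ¬ x < 0 by omega),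
      show (-1 - (x.toNat : Int)) = -x - 1 from by omega]
    simp only [pv_pred_eq]
    rw [pv_filter_cut _ _ _ (show (-x - 1 : Int) ≤ -1 by omega)]
    exact pv_branch _ _ _ acc x
  · intro acc x hx
    obtain ⟨hx0, hx1⟩ := PySem.List.mem_pyRange_one.mp hx
    rw [pv_sim_eq]
    simp only [if_pos (show x < 0 by omega),
      show (-1 - (((-x - 1).toNat : Nat) : Int)) = x from by omega]
    simp only [pv_pred_eq]
    rw [pv_filter_cut _ _ _ (show (x : Int) ≤ -1 by omega)]
    exact pv_branch _ _ _ acc x
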